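-- pv_equiv track=rewrite | github.com/ElizabethGreene/Fusion360Addins | ExportWizard/ExportWizard.py | MakeFilenameUnique
-- ===== SOURCE A (Python) =====
-- def MakeFilenameUnique(bodyName, bodyNames):
--     # Check if the body name is already in the hash table
--     if bodyName in bodyNames:
--         # If it is, increment the count
--         bodyNames[bodyName] += 1
--
--     else:
--         # If it is not, add it to the hash table
--         bodyNames[bodyName] = 0
--
--     # If the count is greater than 0, append the count to the filename
--     if bodyNames[bodyName] > 0:
--         newbodyname = bodyName + '(' + str(bodyNames[bodyName]) + ')'
--         # and pass the bodyname back to the this function again to check if the new name is unique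
--         return MakeFilenameUnique(newbodyname, bodyNames)
--
--     return bodyName
-- ===== SOURCE B (Python) =====
-- def MakeFilenameUnique(bodyName, bodyNames):
--     # Iterative version: the two dict-update branches collapse into one
--     # assignment via dict.get with default -1.
--     while True:
--         count = bodyNames.get(bodyName, -1) + 1
--         bodyNames[bodyName] = count
--         if count <= 0:
--             return bodyName
--         bodyName = bodyName + '(' + str(count) + ')'
-- ===== Notes on version B (the rewrite author's own statement) =====
-- stated objective: simpler
-- what changed: A's tail recursion is rewritten as a while-True loop, and the if/else dict-update branches collapse into a single assignment via dict.get with default -1.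
import Mathlib
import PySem

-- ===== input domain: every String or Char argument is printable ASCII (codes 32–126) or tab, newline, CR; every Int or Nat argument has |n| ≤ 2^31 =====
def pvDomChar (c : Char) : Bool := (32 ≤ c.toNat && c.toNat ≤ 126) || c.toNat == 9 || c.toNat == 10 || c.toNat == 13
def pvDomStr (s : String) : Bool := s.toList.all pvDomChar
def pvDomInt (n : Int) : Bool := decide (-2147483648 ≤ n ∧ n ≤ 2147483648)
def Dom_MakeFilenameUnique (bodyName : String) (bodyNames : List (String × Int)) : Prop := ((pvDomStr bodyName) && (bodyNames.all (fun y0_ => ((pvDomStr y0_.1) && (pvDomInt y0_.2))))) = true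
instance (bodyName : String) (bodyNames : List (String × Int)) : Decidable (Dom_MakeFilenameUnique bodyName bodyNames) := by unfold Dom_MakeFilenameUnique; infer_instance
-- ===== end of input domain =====

-- B replaces A's tail recursion by a while-True loop whose two dict-update branches
-- collapse into one assignment via dict.get with default -1 (objective: simpler).
-- Both A and B mutate the Python dict `bodyNames` identically; the theorems are about the return value.

-- Termination measure shared by both ports: the number of dict entries whose key is
-- at least as long as the current name (the recursion/loop only continues when the
-- current name is a key, and with a strictly longer name over the same key set).
def pvMeasure (name : String) (d : PySem.Dict String Int) : Nat :=
  (d.items.filter (fun p => name.length ≤ p.1.length)).length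

theorem pvMeasure_lt (name newName : String) (d : PySem.Dict String Int) (v : Int)
    (hc : d.contains name = true) (hlen : name.length < newName.length) :
    pvMeasure newName (d.insert name v) < pvMeasure name d := by
  unfold pvMeasure
  rw [PySem.Dict.items_insert_of_contains _ _ hc]
  have hkey : ∀ p : String × Int,
      ((if p.1 == name then (name, v) else p) : String × Int).1.length = p.1.length := by
    intro p
    by_cases h : p.1 = name
    · simp [h]
    · simp [h]
  rw [List.filter_map, List.length_map]
  simp only [Function.comp_def]
  have hfe : (d.items.filter
      (fun p => decide (newName.length ≤ (if (p.1 == name) = true then (name, v) else p).1.length)))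
      = d.items.filter (fun p => decide (newName.length ≤ p.1.length)) := by
    apply List.filter_congr
    intro p _
    rw [hkey p]
  rw [hfe]
  -- the witness entry (name, v₀) ∈ items, kept by the outer filter, dropped by the inner
  have hsome : (d.get? name).isSome := by
    rw [← PySem.Dict.contains_eq_isSome_get?]; exact hc
  obtain ⟨v0, hv0⟩ : ∃ v0, d.get? name = some v0 := Option.isSome_iff_exists.mp hsome
  have hmem : (name, v0) ∈ d.items := PySem.Dict.mem_items_of_get?_eq_some d hv0
  have hsub : d.items.filter (fun p => decide (newName.length ≤ p.1.length))
      = (d.items.filter (fun p => decide (name.length ≤ p.1.length))).filter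
          (fun p => decide (newName.length ≤ p.1.length)) := by
    rw [List.filter_filter]
    apply List.filter_congr
    intro p _
    by_cases h : newName.length ≤ p.1.length
    · have : name.length ≤ p.1.length := le_of_lt (lt_of_lt_of_le hlen h)
      simp [h, this]
    · simp [h]
  rw [hsub]
  apply List.length_filter_lt_length_iff_exists.mpr
  refine ⟨(name, v0), ?_, ?_⟩
  · exact List.mem_filter.mpr ⟨hmem, by simp⟩
  · simp; omega

-- ===== PORT A =====
-- A's recursion, on the dict: update-or-insert branch, then the >0 test and recursive call.
def MakeFilenameUniqueA (bodyName : String) (d : PySem.Dict String Int) : String :=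
  let d' := if d.contains bodyName
            then d.insert bodyName (d.getD bodyName 0 + 1)
            else d.insert bodyName 0
  if h : 0 < d'.getD bodyName 0 then
    MakeFilenameUniqueA (bodyName ++ "(" ++ PySem.Int.toStr (d'.getD bodyName 0) ++ ")") d'
  else
    bodyName
termination_by pvMeasure bodyName d
decreasing_by
  by_cases hc : d.contains bodyName = true
  · simp only [hc]
    apply pvMeasure_lt _ _ _ _ hc
    have h1 : ("(" : String).length = 1 := rfl
    have h2 : (")" : String).length = 1 := rfl
    simp [String.length_append, h1, h2]
    omega
  · exfalso
    simp only [Bool.not_eq_true] at hc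
    have h' : (0:Int) < (if d.contains bodyName = true then d.insert bodyName (d.getD bodyName 0 + 1) else d.insert bodyName 0).getD bodyName 0 := h
    rw [if_neg (by simp [hc]), PySem.Dict.getD_insert_self] at h'
    exact absurd h' (by norm_num)

def MakeFilenameUnique (bodyName : String) (bodyNames : List (String × Int)) : String :=
  MakeFilenameUniqueA bodyName (PySem.Dict.mk bodyNames)

-- ===== PORT B =====
-- B's while-True loop as a tail-recursive function on the same state (name, dict).
def MakeFilenameUniqueB (bodyName : String) (d : PySem.Dict String Int) : String :=
  let count := d.getD bodyName (-1) + 1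
  let d' := d.insert bodyName count
  if h : count ≤ 0 then
    bodyName
  else
    MakeFilenameUniqueB (bodyName ++ "(" ++ PySem.Int.toStr count ++ ")") d'
termination_by pvMeasure bodyName d
decreasing_by
  have hc : d.contains bodyName = true := by
    by_contra hnc
    simp only [Bool.not_eq_true] at hnc
    have h' : ¬ (d.getD bodyName (-1) + 1 ≤ 0) := h
    rw [PySem.Dict.getD_of_not_contains _ _ hnc] at h'
    omega
  apply pvMeasure_lt _ _ _ _ hc
  have h1 : ("(" : String).length = 1 := rfl
  have h2 : (")" : String).length = 1 := rfl
  simp [String.length_append, h1, h2]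
  omega

def MakeFilenameUnique_alt (bodyName : String) (bodyNames : List (String × Int)) : String :=
  MakeFilenameUniqueB bodyName (PySem.Dict.mk bodyNames)

-- ===== PRECONDITION & SPEC =====
def Spec_MakeFilenameUnique (bodyName : String) (bodyNames : List (String × Int)) (out : String) : Prop := out = MakeFilenameUnique_alt bodyName bodyNames
instance (bodyName : String) (bodyNames : List (String × Int)) (out : String) : Decidable (Spec_MakeFilenameUnique bodyName bodyNames out) := by unfold Spec_MakeFilenameUnique; infer_instance

-- ===== CLAIM (what is proved, stated in full; the proofs are below) =====
def Claim_equal_MakeFilenameUnique : Prop := ∀ (bodyName : String) (bodyNames : List (String × Int)), Dom_MakeFilenameUnique bodyName bodyNames → Spec_MakeFilenameUnique bodyName bodyNames (MakeFilenameUnique bodyName bodyNames)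

-- ===== LEMMAS AND PROOFS =====

theorem getD_indep_of_contains (d : PySem.Dict String Int) (k : String)
    (hc : d.contains k = true) (a b : Int) : d.getD k a = d.getD k b := by
  have hsome : (d.get? k).isSome := by
    rw [← PySem.Dict.contains_eq_isSome_get?]; exact hc
  obtain ⟨v, hv⟩ := Option.isSome_iff_exists.mp hsome
  rw [PySem.Dict.getD_eq_get?_getD, PySem.Dict.getD_eq_get?_getD, hv]
  rfl

theorem AB_eq (n : Nat) : ∀ (name : String) (d : PySem.Dict String Int),
    pvMeasure name d < n → MakeFilenameUniqueA name d = MakeFilenameUniqueB name d := by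
  induction n with
  | zero => intro name d h; omega
  | succ n ih =>
    intro name d hn
    rw [MakeFilenameUniqueA.eq_def, MakeFilenameUniqueB.eq_def]
    by_cases hc : d.contains name = true
    · rw [if_pos hc]
      have hg : d.getD name (-1) = d.getD name 0 := getD_indep_of_contains d name hc _ _
      dsimp only
      rw [hg, PySem.Dict.getD_insert_self]
      by_cases hpos : 0 < d.getD name 0 + 1
      · have hnle : ¬ (d.getD name 0 + 1 ≤ 0) := by omega
        simp only [hpos, hnle, dif_pos]
        apply ih
        have := pvMeasure_lt name
          (name ++ "(" ++ PySem.Int.toStr (d.getD name 0 + 1) ++ ")") d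
          (d.getD name 0 + 1) hc (by
            have h1 : ("(" : String).length = 1 := rfl
            have h2 : (")" : String).length = 1 := rfl
            simp [String.length_append, h1, h2]; omega)
        omega
      · have hle : d.getD name 0 + 1 ≤ 0 := by omega
        simp only [hpos, hle, dif_pos]
        simp
    · simp only [Bool.not_eq_true] at hc
      rw [if_neg (by simp [hc])]
      dsimp only
      rw [PySem.Dict.getD_of_not_contains _ _ hc]
      norm_num

-- ===== VERDICT (by name: the statement is the Claim_ definition above) =====
theorem MakeFilenameUnique_spec : Claim_equal_MakeFilenameUnique := by
  intro bodyName bodyNames _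
  unfold Spec_MakeFilenameUnique MakeFilenameUnique MakeFilenameUnique_alt
  exact AB_eq (pvMeasure bodyName (PySem.Dict.mk bodyNames) + 1) _ _ (by omega)
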